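-- pv_equiv track=rewrite | github.com/RodrigoGoni/trash-detection | scripts/prepare_data.py | get_primary_class_for_image
-- ===== SOURCE A (Python) =====
-- from collections import defaultdict, Counter
-- from typing import Dict, List, Tuple, Set
--
-- def get_primary_class_for_image(img_id: int, img_to_anns: Dict,
--                                 minority_classes: Set[int]) -> int:
--     """
--     Get primary class for stratification.
--     Priority: minority class > most frequent class in image.
--     """
--     anns = img_to_anns.get(img_id, [])
--     if not anns:
--         return -1
--
--     # Check if image has minority class
--     minority_in_img = [ann['category_id'] for ann in anns
--                       if ann['category_id'] in minority_classes]
--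
--     if minority_in_img:
--         # Return the minority class with fewest overall examples
--         return min(minority_in_img)
--
--     # Otherwise return most frequent class in this image
--     class_counts = Counter(ann['category_id'] for ann in anns)
--     return class_counts.most_common(1)[0][0]
-- ===== SOURCE B (Python) =====
-- def get_primary_class_for_image(img_id, img_to_anns, minority_classes):
--     """Collapse both priority rules into one total order: each distinct
--     category id (in first-occurrence order) gets key (0, id) if it is a
--     minority class, else (1, -multiplicity); the first minimum under that
--     key is exactly the stratification class."""
--     cids = [ann['category_id'] for ann in img_to_anns.get(img_id, [])]
--     if not cids:
--         return -1
--     return min(dict.fromkeys(cids),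
--                key=lambda c: (0, c) if c in minority_classes
--                              else (1, -cids.count(c)))
-- ===== Notes on version B (the rewrite author's own statement) =====
-- stated objective: alternative
-- what changed: Replaces A's two-phase branch (minority-id filter + min(), else Counter + most_common) by a single selection rule: every distinct category id, in first-occurrence order, gets a lexicographic priority key ((0, id) for minority ids, (1, -multiplicity) otherwise) and the one first-minimum under that key is returned.
import Mathlib
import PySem

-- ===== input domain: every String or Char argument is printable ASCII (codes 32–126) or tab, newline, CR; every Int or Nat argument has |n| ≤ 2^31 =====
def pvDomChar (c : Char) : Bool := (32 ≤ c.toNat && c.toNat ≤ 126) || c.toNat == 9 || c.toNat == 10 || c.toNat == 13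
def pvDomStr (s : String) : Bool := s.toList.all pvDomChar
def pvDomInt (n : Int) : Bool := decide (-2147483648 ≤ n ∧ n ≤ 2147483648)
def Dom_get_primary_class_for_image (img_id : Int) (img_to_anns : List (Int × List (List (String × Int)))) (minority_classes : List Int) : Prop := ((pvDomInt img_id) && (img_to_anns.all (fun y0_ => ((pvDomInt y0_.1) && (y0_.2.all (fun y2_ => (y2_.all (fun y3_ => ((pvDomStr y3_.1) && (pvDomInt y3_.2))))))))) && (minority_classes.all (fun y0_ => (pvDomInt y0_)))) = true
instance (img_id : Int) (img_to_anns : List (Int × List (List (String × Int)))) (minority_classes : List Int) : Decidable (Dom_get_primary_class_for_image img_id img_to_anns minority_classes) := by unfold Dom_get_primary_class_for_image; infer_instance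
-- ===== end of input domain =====

-- B replaces A's two-phase branch (minority filter + min, else Counter.most_common) by a single
-- selection: one lexicographic priority key per distinct id and one first-minimum over them
-- (alternative decomposition, no phase branch).
-- ===== PORT A =====
-- a KeyError on ann['category_id'] is excluded by Pre_; the .getD 0 default is never used inside Pre_
def pvCategoryId (ann : List (String × Int)) : Int :=
  ((PySem.Dict.mk ann).get? "category_id").getD 0

def get_primary_class_for_image (img_id : Int) (img_to_anns : List (Int × List (List (String × Int)))) (minority_classes : List Int) : Int :=
  let anns := (PySem.Dict.mk img_to_anns).getD img_id []
  if anns.isEmpty then -1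
  else
    let minority_in_img := anns.filterMap (fun ann =>
      if minority_classes.contains (pvCategoryId ann) then some (pvCategoryId ann) else none)
    if !minority_in_img.isEmpty then
      (PySem.List.min? minority_in_img (fun x => x)).getD 0
    else
      let class_counts := PySem.Dict.counter (anns.map pvCategoryId)
      ((PySem.List.max? class_counts.items (fun kv => kv.2)).getD (0, 0)).1

-- ===== PORT B =====
-- the key lambda of Source B: (0, c) for a minority id, (1, -multiplicity) otherwise, as its two components
def pvKey1 (mc : List Int) (c : Int) : Int :=
  if mc.contains c then 0 else 1
def pvKey2 (mc : List Int) (cids : List Int) (c : Int) : Int :=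
  if mc.contains c then c else -(PySem.List.count cids c : Int)

def get_primary_class_for_image_alt (img_id : Int) (img_to_anns : List (Int × List (List (String × Int)))) (minority_classes : List Int) : Int :=
  let cids := ((PySem.Dict.mk img_to_anns).getD img_id []).map pvCategoryId
  if cids.isEmpty then -1
  else
    (PySem.List.min2? (PySem.List.dedup cids)
      (pvKey1 minority_classes) (pvKey2 minority_classes cids)).getD 0

-- ===== PRECONDITION & SPEC =====
-- Pre_ excludes exactly the inputs where an annotation of the selected image lacks the
-- 'category_id' key, on which the Python A raises KeyError (and B raises there too).
def Pre_get_primary_class_for_image (img_id : Int) (img_to_anns : List (Int × List (List (String × Int)))) (minority_classes : List Int) : Prop :=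
  ∀ ann ∈ (PySem.Dict.mk img_to_anns).getD img_id [], (PySem.Dict.mk ann).contains "category_id" = true
instance (img_id : Int) (img_to_anns : List (Int × List (List (String × Int)))) (minority_classes : List Int) : Decidable (Pre_get_primary_class_for_image img_id img_to_anns minority_classes) := by unfold Pre_get_primary_class_for_image; infer_instance

def pvWitness_get_primary_class_for_image : Int × (List (Int × List (List (String × Int)))) × List Int :=
  (1, [(1, [[("category_id", 2)], [("category_id", 3)]])], [3])
def Spec_get_primary_class_for_image (img_id : Int) (img_to_anns : List (Int × List (List (String × Int)))) (minority_classes : List Int) (out : Int) : Prop := out = get_primary_class_for_image_alt img_id img_to_anns minority_classes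
instance (img_id : Int) (img_to_anns : List (Int × List (List (String × Int)))) (minority_classes : List Int) (out : Int) : Decidable (Spec_get_primary_class_for_image img_id img_to_anns minority_classes out) := by unfold Spec_get_primary_class_for_image; infer_instance

-- ===== CLAIM (what is proved, stated in full; the proofs are below) =====
def Claim_equal_get_primary_class_for_image : Prop := ∀ (img_id : Int) (img_to_anns : List (Int × List (List (String × Int)))) (minority_classes : List Int), Dom_get_primary_class_for_image img_id img_to_anns minority_classes → Pre_get_primary_class_for_image img_id img_to_anns minority_classes → Spec_get_primary_class_for_image img_id img_to_anns minority_classes (get_primary_class_for_image img_id img_to_anns minority_classes)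

-- ===== LEMMAS AND PROOFS =====

-- A's comprehension over anns is a filter over the mapped category ids
theorem pv_filterMap_eq (mc : List Int) (anns : List (List (String × Int))) :
    anns.filterMap (fun ann =>
      if mc.contains (pvCategoryId ann) then some (pvCategoryId ann) else none)
      = (anns.map pvCategoryId).filter (fun c => mc.contains c) := by
  induction anns with
  | nil => rfl
  | cons a t ih =>
    simp only [List.filterMap_cons, List.map_cons, List.filter_cons]
    by_cases h : pvCategoryId a ∈ mc <;> simp only [List.contains_iff_mem, h,
      if_true, if_false] <;> simpa using ih

-- generic invariant for min2?'s fold: once the accumulator holds m, an element whose key is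
-- strictly above m's never replaces it, and m (when met) always replaces a strictly greater acc
theorem pv_min2_strict_aux {α : Type} (k1 k2 : α → Int) (m : α)
    (f : Option α → α → Option α)
    (hf : ∀ b x, f (some b) x =
      if (decide (k1 x < k1 b) || (!decide (k1 b < k1 x) && decide (k2 x < k2 b))) = true
      then some x else some b) :
    ∀ (xs : List α) (a : α),
      (a = m ∨ k1 m < k1 a ∨ (k1 m = k1 a ∧ k2 m < k2 a)) →
      (m ∈ xs ∨ a = m) →
      (∀ y ∈ xs, y = m ∨ k1 m < k1 y ∨ (k1 m = k1 y ∧ k2 m < k2 y)) →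
      xs.foldl f (some a) = some m := by
  intro xs
  induction xs with
  | nil =>
    intro a _ hmem _
    rcases hmem with h | h
    · simp at h
    · subst h; rfl
  | cons x t ih =>
    intro a ha hmem hall
    rw [List.foldl_cons, hf]
    by_cases hcond :
        (decide (k1 x < k1 a) || (!decide (k1 a < k1 x) && decide (k2 x < k2 a))) = true
    · rw [if_pos hcond]
      refine ih x (hall x List.mem_cons_self) ?_
        (fun y hy => hall y (List.mem_cons_of_mem _ hy))
      by_cases hxm : x = m
      · exact Or.inr hxm
      rcases hmem with hmem | ham
      · rcases List.mem_cons.mp hmem with h | h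
        · exact absurd h.symm hxm
        · exact Or.inl h
      · exfalso
        subst ham
        rcases hall x List.mem_cons_self with h | h
        · exact hxm h
        · simp only [Bool.or_eq_true, Bool.and_eq_true, Bool.not_eq_true',
            decide_eq_true_eq, decide_eq_false_iff_not] at hcond
          rcases h with h1 | ⟨h1, h2⟩ <;> rcases hcond with hc | ⟨hc1, hc2⟩ <;> omega
    · rw [if_neg hcond]
      refine ih a ha ?_ (fun y hy => hall y (List.mem_cons_of_mem _ hy))
      rcases hmem with hmem | ham
      · rcases List.mem_cons.mp hmem with h | h
        · subst h
          by_cases ham : a = m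
          · exact Or.inr ham
          exfalso
          rcases ha with h | h
          · exact ham h
          · simp only [Bool.or_eq_true, Bool.and_eq_true, Bool.not_eq_true',
              decide_eq_true_eq, decide_eq_false_iff_not, not_or, not_and] at hcond
            rcases h with h1 | ⟨h1, h2⟩ <;> rcases hcond with ⟨hc1, hc2⟩ <;> omega
        · exact Or.inl h
      · exact Or.inr ham

-- min2? returns the element whose key is strictly below every other element's key
theorem pv_min2_strict {α : Type} (k1 k2 : α → Int) (xs : List α) (m : α)
    (hm : m ∈ xs)
    (h : ∀ y ∈ xs, y ≠ m → k1 m < k1 y ∨ (k1 m = k1 y ∧ k2 m < k2 y)) :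
    PySem.List.min2? xs k1 k2 = some m := by
  cases xs with
  | nil => simp at hm
  | cons x t =>
    unfold PySem.List.min2?
    rw [List.foldl_cons]
    have hinv : ∀ y ∈ x :: t, y = m ∨ k1 m < k1 y ∨ (k1 m = k1 y ∧ k2 m < k2 y) := by
      intro y hy
      by_cases hym : y = m
      · exact Or.inl hym
      · exact Or.inr (h y hy hym)
    refine pv_min2_strict_aux k1 k2 m _ (fun b y => rfl) t x
      (hinv x List.mem_cons_self) ?_ (fun y hy => hinv y (List.mem_cons_of_mem _ hy))
    by_cases hxm : x = m
    · exact Or.inr hxm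
    · rcases List.mem_cons.mp hm with hh | hh
      · exact absurd hh.symm hxm
      · exact Or.inl hh

-- when no element is a minority id, B's two-component minimum fold is A's running maximum of the counts
theorem pv_min2_nonmin_aux (mc cids : List Int)
    (f g : Option Int → Int → Option Int)
    (hf : ∀ b x, f (some b) x =
      if (decide (pvKey1 mc x < pvKey1 mc b) ||
          (!decide (pvKey1 mc b < pvKey1 mc x) && decide (pvKey2 mc cids x < pvKey2 mc cids b))) = true
      then some x else some b)
    (hg : ∀ b x, g (some b) x =
      if (PySem.List.count cids b : Int) < (PySem.List.count cids x : Int)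
      then some x else some b) :
    ∀ (xs : List Int) (a : Int), mc.contains a = false → (∀ y ∈ xs, mc.contains y = false) →
      xs.foldl f (some a) = xs.foldl g (some a) := by
  intro xs
  induction xs with
  | nil => intro a _ _; rfl
  | cons x t ih =>
    intro a ha hall
    have hx : mc.contains x = false := hall x List.mem_cons_self
    have e : (decide (pvKey1 mc x < pvKey1 mc a) ||
        (!decide (pvKey1 mc a < pvKey1 mc x) && decide (pvKey2 mc cids x < pvKey2 mc cids a)))
        = decide ((PySem.List.count cids a : Int) < (PySem.List.count cids x : Int)) := by
      simp only [pvKey1, pvKey2, ha, hx, Bool.false_eq_true, if_false]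
      simp [neg_lt_neg_iff]
    rw [List.foldl_cons, List.foldl_cons, hf, hg, e]
    simp only [decide_eq_true_eq]
    split_ifs with hc
    · exact ih x hx (fun y hy => hall y (List.mem_cons_of_mem _ hy))
    · exact ih a ha (fun y hy => hall y (List.mem_cons_of_mem _ hy))

theorem pv_min2_nonmin (mc cids : List Int) (xs : List Int)
    (h : ∀ y ∈ xs, mc.contains y = false) :
    PySem.List.min2? xs (pvKey1 mc) (pvKey2 mc cids)
      = PySem.List.max? xs (fun c => (PySem.List.count cids c : Int)) := by
  cases xs with
  | nil => rfl
  | cons x t =>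
    unfold PySem.List.min2? PySem.List.max?
    rw [List.foldl_cons, List.foldl_cons]
    exact pv_min2_nonmin_aux mc cids _ _ (fun b y => rfl) (fun b y => rfl) t x
      (h x List.mem_cons_self) (fun y hy => h y (List.mem_cons_of_mem _ hy))

-- max? over a mapped list is the mapped max? with the composed key
theorem pv_max?_map_aux {α β : Type} (f : α → β) (g : β → Int)
    (F : Option β → β → Option β) (G : Option α → α → Option α)
    (hF : ∀ b x, F (some b) x = if g b < g x then some x else some b)
    (hG : ∀ b x, G (some b) x = if g (f b) < g (f x) then some x else some b) :
    ∀ (xs : List α) (a : α),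
      (xs.map f).foldl F (some (f a)) = (xs.foldl G (some a)).map f := by
  intro xs
  induction xs with
  | nil => intro a; rfl
  | cons x t ih =>
    intro a
    rw [List.map_cons, List.foldl_cons, List.foldl_cons, hF, hG]
    by_cases hc : g (f a) < g (f x)
    · rw [if_pos hc, if_pos hc]; exact ih x
    · rw [if_neg hc, if_neg hc]; exact ih a

theorem pv_max?_map {α β : Type} (f : α → β) (g : β → Int) (xs : List α) :
    PySem.List.max? (xs.map f) g = (PySem.List.max? xs (fun x => g (f x))).map f := by
  cases xs with
  | nil => rfl
  | cons x t =>
    unfold PySem.List.max?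
    rw [List.map_cons, List.foldl_cons, List.foldl_cons]
    exact pv_max?_map_aux f g _ _ (fun b y => rfl) (fun b y => rfl) t x

-- the equality over the category-id list of the selected image, once it is known nonempty
theorem pv_core_cids (mc : List Int) (cids : List Int) (hne : cids ≠ []) :
    (if !(cids.filter (fun c => mc.contains c)).isEmpty then
        (PySem.List.min? (cids.filter (fun c => mc.contains c)) (fun x => x)).getD 0
      else ((PySem.List.max? (PySem.Dict.counter cids).items (fun kv => kv.2)).getD (0, 0)).1)
    = (PySem.List.min2? (PySem.List.dedup cids) (pvKey1 mc) (pvKey2 mc cids)).getD 0 := by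
  cases hM : cids.filter (fun c => mc.contains c) with
  | cons x t =>
    simp only [List.isEmpty_cons, Bool.not_false, if_true]
    rw [PySem.List.min?_id_cons]
    set m := t.foldl min x with hm
    have hmM : m ∈ x :: t := by
      rcases PySem.List.foldl_min_mem t x with h | h
      · rw [hm, h]; exact List.mem_cons_self
      · exact List.mem_cons_of_mem _ h
    have hmfil : m ∈ cids.filter (fun c => mc.contains c) := by rw [hM]; exact hmM
    have hmc : mc.contains m = true := by simpa using List.of_mem_filter hmfil
    have hmcids : m ∈ cids := List.mem_of_mem_filter hmfil
    have hmd : m ∈ PySem.List.dedup cids := by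
      rw [PySem.List.dedup_eq_ofList]; exact (PySem.Set.mem_ofList _ _).mpr hmcids
    have hle : ∀ y ∈ x :: t, m ≤ y := by
      intro y hy
      rcases List.mem_cons.mp hy with h | h
      · subst h; exact (PySem.List.foldl_min_le t y).1
      · exact (PySem.List.foldl_min_le t x).2 y h
    have hstrict : ∀ y ∈ PySem.List.dedup cids, y ≠ m →
        pvKey1 mc m < pvKey1 mc y ∨ (pvKey1 mc m = pvKey1 mc y ∧ pvKey2 mc cids m < pvKey2 mc cids y) := by
      intro y hy hne'
      have hycids : y ∈ cids := by
        rw [PySem.List.dedup_eq_ofList] at hy; exact (PySem.Set.mem_ofList _ _).mp hy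
      have hmc' : m ∈ mc := by simpa using hmc
      by_cases hyc : y ∈ mc
      · refine Or.inr ⟨by simp [pvKey1, hmc', hyc], ?_⟩
        have hyM : y ∈ x :: t := by
          rw [← hM]; exact List.mem_filter.mpr ⟨hycids, by simpa using hyc⟩
        have hlt : m < y := lt_of_le_of_ne (hle y hyM) (Ne.symm hne')
        simpa [pvKey2, hmc', hyc] using hlt
      · refine Or.inl ?_
        simp [pvKey1, hmc', hyc]
    rw [pv_min2_strict (pvKey1 mc) (pvKey2 mc cids) _ m hmd hstrict]
  | nil =>
    simp only [List.isEmpty_nil, Bool.not_true, Bool.false_eq_true, if_false]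
    have hnone : ∀ y ∈ cids, mc.contains y = false := by
      intro y hy
      have := List.filter_eq_nil_iff.mp hM y hy
      simpa using this
    rw [PySem.Dict.items_counter cids,
      pv_max?_map (fun k => (k, ((List.count k cids : Nat) : Int))) (fun kv => kv.2),
      PySem.List.dedup_eq_ofList,
      pv_min2_nonmin mc cids _ (fun y hy => hnone y ((PySem.Set.mem_ofList _ _).mp hy))]
    have hcount : (fun c => (PySem.List.count cids c : Int))
        = (fun k => ((List.count k cids : Nat) : Int)) := by
      funext c; rw [PySem.List.count_eq]
    rw [hcount]
    have hS : PySem.Set.ofList cids ≠ [] := by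
      cases cids with
      | nil => exact absurd rfl hne
      | cons c cs =>
        intro hEq
        have hcm : c ∈ PySem.Set.ofList (c :: cs) :=
          (PySem.Set.mem_ofList _ _).mpr List.mem_cons_self
        rw [hEq] at hcm; simp at hcm
    cases hk : PySem.List.max? (PySem.Set.ofList cids) (fun k => ((List.count k cids : Nat) : Int)) with
    | none => exact absurd ((PySem.List.max?_eq_none_iff _ _).mp hk) hS
    | some k0 => rfl

-- the common core, on the annotation list actually selected for the image
theorem pv_core (mc : List Int) (anns : List (List (String × Int))) :
    (if anns.isEmpty then (-1 : Int)
     else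
       let minority_in_img := anns.filterMap (fun ann =>
         if mc.contains (pvCategoryId ann) then some (pvCategoryId ann) else none)
       if !minority_in_img.isEmpty then
         (PySem.List.min? minority_in_img (fun x => x)).getD 0
       else
         let class_counts := PySem.Dict.counter (anns.map pvCategoryId)
         ((PySem.List.max? class_counts.items (fun kv => kv.2)).getD (0, 0)).1)
    = (let cids := anns.map pvCategoryId
       if cids.isEmpty then -1
       else
         (PySem.List.min2? (PySem.List.dedup cids)
           (pvKey1 mc) (pvKey2 mc cids)).getD 0) := by
  cases anns with
  | nil => rfl
  | cons a0 arest =>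
    simp only [List.isEmpty_cons, Bool.false_eq_true, if_false, List.map_cons]
    rw [pv_filterMap_eq]
    have := pv_core_cids mc ((a0 :: arest).map pvCategoryId) (by simp)
    simpa using this

-- ===== VERDICT (by name: the statement is the Claim_ definition above) =====
theorem get_primary_class_for_image_spec : Claim_equal_get_primary_class_for_image := by
  intro img_id img_to_anns minority_classes _dom _pre
  unfold Spec_get_primary_class_for_image
  unfold get_primary_class_for_image get_primary_class_for_image_alt
  exact pv_core minority_classes ((PySem.Dict.mk img_to_anns).getD img_id [])
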